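-- pv_equiv track=rewrite | github.com/pypi-data/pypi-mirror-353 | packages/arc-eval/arc_eval-0.2.9-py3-none-any.whl/agent_eval/commands/compliance_handler.py | _extract_fix_description
-- ===== SOURCE A (Python) =====
-- def _extract_fix_description(fix_content: str) -> str:
--     """Extract a concise description from fix content."""
--     try:
--         # Look for the first line that contains a description
--         lines = fix_content.strip().split('\n')
--         for line in lines:
--             if line.startswith('# Fix for') and ':' in line:
--                 # Extract description after the colon
--                 return line.split(':', 2)[-1].strip()
--
--         # Fallback: use first meaningful line
--         for line in lines:
--             if line.strip() and not line.startswith('#') and not line.startswith('```'):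
--                 return line.strip()[:50] + "..." if len(line.strip()) > 50 else line.strip()
--
--         return "Code improvement fix"
--
--     except Exception:
--         return "Generated fix"
-- ===== SOURCE B (Python) =====
-- def _extract_fix_description(fix_content: str) -> str:
--     """Extract a concise description from fix content.
--
--     Recursive back-to-front scan computing BOTH candidates (first fix-header
--     description, first meaningful line) in a single structural recursion,
--     then resolving priority once at the end."""
--     try:
--         def scan(lines):
--             if not lines:
--                 return (None, None)
--             head, rest = lines[0], lines[1:]
--             f, m = scan(rest)
--             if head.startswith('# Fix for') and ':' in head:
--                 f = head.split(':', 2)[-1].strip()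
--             s = head.strip()
--             if s and not head.startswith('#') and not head.startswith('```'):
--                 m = s[:50] + '...' if len(s) > 50 else s
--             return (f, m)
--         f, m = scan(fix_content.strip().split('\n'))
--         if f is not None:
--             return f
--         if m is not None:
--             return m
--         return "Code improvement fix"
--     except Exception:
--         return "Generated fix"
-- ===== Notes on version B (the rewrite author's own statement) =====
-- stated objective: alternative
-- what changed: Replaces A's two forward early-return scans with one structural recursion over the line list from the back, accumulating a pair (first fix-header description, first meaningful line) by overwriting with earlier lines, and resolving the priority once after the recursion.
import Mathlib
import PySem

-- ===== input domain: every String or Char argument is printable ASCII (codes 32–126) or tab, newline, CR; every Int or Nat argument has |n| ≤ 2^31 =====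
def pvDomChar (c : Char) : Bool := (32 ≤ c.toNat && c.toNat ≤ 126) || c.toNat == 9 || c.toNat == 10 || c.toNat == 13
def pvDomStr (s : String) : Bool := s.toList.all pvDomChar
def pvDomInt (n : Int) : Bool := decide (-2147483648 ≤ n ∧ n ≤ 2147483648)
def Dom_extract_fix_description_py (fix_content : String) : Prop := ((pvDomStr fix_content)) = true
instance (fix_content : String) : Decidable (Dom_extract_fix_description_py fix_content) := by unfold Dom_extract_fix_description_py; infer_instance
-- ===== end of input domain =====

-- B replaces A's two forward early-return scans by one back-to-front structural
-- recursion gathering both candidates in a pair (objective: alternative).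

-- ===== PORT A =====
-- line.startswith('# Fix for') and ':' in line
def aIsFixFor (line : String) : Bool :=
  PySem.Str.startswith line "# Fix for" && PySem.Str.isIn ":" line

-- line.split(':', 2)[-1].strip()
def aDesc (line : String) : String :=
  PySem.Str.strip (((PySem.Str.splitMax? line ":" 2).getD [line]).getLastD "")

-- line.strip() and not line.startswith('#') and not line.startswith('```')
def aIsMeaningful (line : String) : Bool :=
  !(PySem.Str.strip line == "") && !(PySem.Str.startswith line "#") && !(PySem.Str.startswith line "```")

-- line.strip()[:50] + "..." if len(line.strip()) > 50 else line.strip()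
def aTruncated (line : String) : String :=
  if PySem.Str.len (PySem.Str.strip line) > 50 then
    PySem.Str.slice (PySem.Str.strip line) none (some 50) ++ "..."
  else PySem.Str.strip line

-- first for-loop of A: return on the first '# Fix for …:' line
def aLoop1 : List String → Option String
  | [] => none
  | l :: ls => if aIsFixFor l then some (aDesc l) else aLoop1 ls

-- second for-loop of A: return on the first meaningful line
def aLoop2 : List String → Option String
  | [] => none
  | l :: ls => if aIsMeaningful l then some (aTruncated l) else aLoop2 ls

def extract_fix_description_py (fix_content : String) : String :=
  let lines := (PySem.Str.split? (PySem.Str.strip fix_content) "\n").getD []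
  match aLoop1 lines with
  | some r => r
  | none =>
    match aLoop2 lines with
    | some r => r
    | none => "Code improvement fix"

-- ===== PORT B =====
-- scan(lines): structural recursion returning the pair
-- (first '# Fix for …:' description, first meaningful line), built back-to-front:
-- the recursive result for the tail is overwritten by the head where it qualifies.
def bScan : List String → Option String × Option String
  | [] => (none, none)
  | head :: rest =>
    let fm := bScan rest
    let f : Option String :=
      if PySem.Str.startswith head "# Fix for" && PySem.Str.isIn ":" head then
        some (PySem.Str.strip (((PySem.Str.splitMax? head ":" 2).getD [head]).getLastD ""))
      else fm.1
    let s := PySem.Str.strip head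
    let m : Option String :=
      if !(s == "") && !(PySem.Str.startswith head "#") && !(PySem.Str.startswith head "```") then
        some (if PySem.Str.len s > 50 then PySem.Str.slice s none (some 50) ++ "..." else s)
      else fm.2
    (f, m)

def extract_fix_description_py_alt (fix_content : String) : String :=
  match bScan ((PySem.Str.split? (PySem.Str.strip fix_content) "\n").getD []) with
  | (some f, _) => f
  | (none, some m) => m
  | (none, none) => "Code improvement fix"

-- ===== PRECONDITION & SPEC =====
def Spec_extract_fix_description_py (fix_content : String) (out : String) : Prop := out = extract_fix_description_py_alt fix_content
instance (fix_content : String) (out : String) : Decidable (Spec_extract_fix_description_py fix_content out) := by unfold Spec_extract_fix_description_py; infer_instance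

-- ===== CLAIM =====
def Claim_equal_extract_fix_description_py : Prop := ∀ (fix_content : String), Dom_extract_fix_description_py fix_content → Spec_extract_fix_description_py fix_content (extract_fix_description_py fix_content)

-- ===== LEMMAS AND PROOFS =====
-- B's back-to-front pair equals A's two forward searches component-wise.
theorem bScan_eq (ls : List String) : bScan ls = (aLoop1 ls, aLoop2 ls) := by
  induction ls with
  | nil => rfl
  | cons l ls ih =>
    simp only [bScan, ih, aLoop1, aLoop2, aIsFixFor, aDesc, aIsMeaningful, aTruncated]


-- ===== VERDICT =====
theorem extract_fix_description_py_spec : Claim_equal_extract_fix_description_py := by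
  intro fc _
  simp only [Spec_extract_fix_description_py, extract_fix_description_py,
    extract_fix_description_py_alt]
  rw [bScan_eq]
  cases h1 : aLoop1 ((PySem.Str.split? (PySem.Str.strip fc) "\n").getD []) with
  | some r => rfl
  | none => cases aLoop2 ((PySem.Str.split? (PySem.Str.strip fc) "\n").getD []) <;> rfl
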